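-- pv_equiv track=rewrite | github.com/wangzhecheng/GridMapping | africa/evaluation_utils.py | generate_end_points
-- ===== SOURCE A (Python) =====
-- def generate_end_points(l):
--     """Given a list, generate the endpoints for any sequence of elements (segments).
--     E.g. given [a, b, c], return the dict of [a, b], [b, c], and [a, c]."""
--     assert len(l) >= 2
--     endpoints_dict = {}
--     for i in range(2, len(l)+1):
--         for j in range(0, len(l)-i+1):
--             endpoints_dict[(l[j], l[j + i - 1])] = []
--             for k in range(j, j + i - 1):
--                 endpoints_dict[(l[j], l[j + i - 1])].append((l[k], l[k + 1]))
--     return endpoints_dict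
-- ===== SOURCE B (Python) =====
-- def generate_end_points(l):
--     """Given a list, generate the endpoints for any sequence of elements (segments).
--     E.g. given [a, b, c], return the dict of [a, b], [b, c], and [a, c]."""
--     assert len(l) >= 2
--     pairs = [(l[k], l[k + 1]) for k in range(len(l) - 1)]
--     endpoints_dict = {}
--     segs = [[p] for p in pairs]  # segment lists of all windows of the current length
--     m = 2
--     while segs:
--         for j, seg in enumerate(segs):
--             endpoints_dict[(l[j], l[j + m - 1])] = seg
--         segs = [segs[j] + [pairs[j + m - 1]] for j in range(len(segs) - 1)]
--         m += 1
--     return endpoints_dict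
-- ===== Notes on version B (the rewrite author's own statement) =====
-- stated objective: alternative
-- what changed: B replaces A's three nested loops that rebuild every window's pair list from scratch with a dynamic-programming sweep: it keeps the segment lists of all windows of the current length and extends each by one precomputed pair per round, emitting dict entries as it goes.
import Mathlib
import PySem

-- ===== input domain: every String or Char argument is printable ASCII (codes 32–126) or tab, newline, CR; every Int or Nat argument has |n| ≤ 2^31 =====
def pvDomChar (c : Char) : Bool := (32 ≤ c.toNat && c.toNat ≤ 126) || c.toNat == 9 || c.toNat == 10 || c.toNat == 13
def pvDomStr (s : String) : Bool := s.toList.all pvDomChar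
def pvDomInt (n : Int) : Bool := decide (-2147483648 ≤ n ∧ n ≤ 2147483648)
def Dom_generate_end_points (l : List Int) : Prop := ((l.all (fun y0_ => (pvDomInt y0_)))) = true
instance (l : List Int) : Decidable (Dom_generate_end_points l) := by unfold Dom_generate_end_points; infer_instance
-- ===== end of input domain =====

-- B replaces A's per-window rebuild loops with a dynamic-programming sweep that extends each
-- window's segment list by one pair per round (simpler decomposition; return-value equivalence).

-- ===== PORT A =====
def generate_end_points (l : List Int) : List (Int × Int × List (Int × Int)) :=
  let n : Int := l.length
  ((PySem.List.pyRange 2 (n + 1) 1).foldl (fun d i =>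
    (PySem.List.pyRange 0 (n - i + 1) 1).foldl (fun d j =>
      let key := (PySem.List.pyGetD l j 0, PySem.List.pyGetD l (j + i - 1) 0)
      (PySem.List.pyRange j (j + i - 1) 1).foldl
        (fun d k => d.modify key []
          (fun v => v ++ [(PySem.List.pyGetD l k 0, PySem.List.pyGetD l (k + 1) 0)]))
        (d.insert key [])) d)
    (PySem.Dict.empty : PySem.Dict (Int × Int) (List (Int × Int)))).items.map (fun p => (p.1.1, p.1.2, p.2))

-- ===== PORT B =====
-- B's while-loop: one round per window length m; segs holds the segment lists of all current windows.
def pvAltLoop (l : List Int) (pairs : List (Int × Int)) (m : Int)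
    (segs : List (List (Int × Int))) (d : PySem.Dict (Int × Int) (List (Int × Int))) :
    PySem.Dict (Int × Int) (List (Int × Int)) :=
  if h : segs = [] then d
  else
    let d' := (PySem.List.enumerate segs).foldl
      (fun d js => d.insert (PySem.List.pyGetD l js.1 0, PySem.List.pyGetD l (js.1 + m - 1) 0) js.2) d
    pvAltLoop l pairs (m + 1)
      ((PySem.List.pyRange 0 ((segs.length : Int) - 1) 1).map
        (fun j => PySem.List.pyGetD segs j [] ++ [PySem.List.pyGetD pairs (j + m - 1) (0, 0)])) d'
termination_by segs.length
decreasing_by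
  have hp : 0 < segs.length := List.length_pos_iff.mpr h
  simp [PySem.List.length_pyRange_one]
  omega

def generate_end_points_alt (l : List Int) : List (Int × Int × List (Int × Int)) :=
  let n : Int := l.length
  let pairs : List (Int × Int) :=
    (PySem.List.pyRange 0 (n - 1) 1).map
      (fun k => (PySem.List.pyGetD l k 0, PySem.List.pyGetD l (k + 1) 0))
  let segs : List (List (Int × Int)) := pairs.map (fun p => [p])
  (pvAltLoop l pairs 2 segs PySem.Dict.empty).items.map (fun p => (p.1.1, p.1.2, p.2))

-- ===== PRECONDITION & SPEC =====
-- A's assert raises AssertionError when len(l) < 2; Pre_ excludes exactly those inputs.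
def Pre_generate_end_points (l : List Int) : Prop := 2 ≤ l.length
instance (l : List Int) : Decidable (Pre_generate_end_points l) := by unfold Pre_generate_end_points; infer_instance
def pvWitness_generate_end_points : List Int := ([0, 1] : List Int)

def Spec_generate_end_points (l : List Int) (out : List (Int × Int × List (Int × Int))) : Prop := out = generate_end_points_alt l
instance (l : List Int) (out : List (Int × Int × List (Int × Int))) : Decidable (Spec_generate_end_points l out) := by unfold Spec_generate_end_points; infer_instance

-- ===== CLAIM (what is proved, stated in full; the proofs are below) =====
def Claim_equal_generate_end_points : Prop := ∀ (l : List Int), Dom_generate_end_points l → Pre_generate_end_points l → Spec_generate_end_points l (generate_end_points l)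

-- ===== LEMMAS AND PROOFS =====

-- the consecutive pair at position k, and the segment list of the window [j, j+i-1]
def pvPf (l : List Int) (k : Int) : Int × Int :=
  (PySem.List.pyGetD l k 0, PySem.List.pyGetD l (k + 1) 0)
def pvW (l : List Int) (i j : Int) : List (Int × Int) :=
  (PySem.List.pyRange j (j + i - 1) 1).map (pvPf l)
-- one round of the common reference fold: insert every window of length i
def pvF (l : List Int) (d : PySem.Dict (Int × Int) (List (Int × Int))) (i : Int) :
    PySem.Dict (Int × Int) (List (Int × Int)) :=
  (PySem.List.pyRange 0 ((l.length : Int) - i + 1) 1).foldl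
    (fun d j => d.insert (PySem.List.pyGetD l j 0, PySem.List.pyGetD l (j + i - 1) 0) (pvW l i j)) d

-- modify on a key just inserted updates that entry in place.
theorem pv_modify_insert {κ ν : Type} [BEq κ] [LawfulBEq κ]
    (d : PySem.Dict κ ν) (k : κ) (v d0 : ν) (f : ν → ν) :
    (d.insert k v).modify k d0 f = d.insert k (f v) := by
  simp [PySem.Dict.modify, PySem.Dict.getD_insert_self, PySem.Dict.insert_insert_self]

-- A's inner append loop, started from d.insert k v, accumulates v ++ map g r at key k.
theorem pv_fold_append {κ ν : Type} [BEq κ] [LawfulBEq κ]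
    (r : List Int) (d : PySem.Dict κ (List ν)) (k : κ) (v : List ν) (g : Int → ν) :
    r.foldl (fun d x => d.modify k [] (fun w => w ++ [g x])) (d.insert k v)
      = d.insert k (v ++ r.map g) := by
  induction r generalizing v with
  | nil => simp
  | cons x xs ih =>
      simp only [List.foldl_cons, pv_modify_insert, ih]
      simp

-- A equals the reference fold over window lengths.
theorem pv_A_eq_ref (l : List Int) :
    generate_end_points l
      = ((PySem.List.pyRange 2 ((l.length : Int) + 1) 1).foldl (pvF l)
          (PySem.Dict.empty : PySem.Dict (Int × Int) (List (Int × Int)))).items.map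
          (fun p => (p.1.1, p.1.2, p.2)) := by
  unfold generate_end_points
  simp only
  congr 1
  congr 1
  apply PySem.List.foldl_congr_mem
  intro d i hi
  unfold pvF
  apply PySem.List.foldl_congr_mem
  intro d' j hj
  rw [pv_fold_append, List.nil_append]
  rfl

-- B's while-loop equals the reference fold over the remaining window lengths.
theorem pv_altLoop_eq_ref (l : List Int) (c m : Nat) (d : PySem.Dict (Int × Int) (List (Int × Int)))
    (hm : 2 ≤ m) (hc : ((l.length : Int) - m + 1).toNat = c) :
    pvAltLoop l ((PySem.List.pyRange 0 ((l.length : Int) - 1) 1).map (pvPf l)) (m : Int)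
        ((PySem.List.pyRange 0 ((l.length : Int) - m + 1) 1).map (pvW l m)) d
      = (PySem.List.pyRange (m : Int) ((l.length : Int) + 1) 1).foldl (pvF l) d := by
  induction c generalizing m d with
  | zero =>
      have hle : (l.length : Int) - m + 1 ≤ 0 := by omega
      have hnil : ((PySem.List.pyRange 0 ((l.length : Int) - m + 1) 1).map (pvW l m)) = [] := by
        rw [PySem.List.pyRange_one_eq_nil hle]; rfl
      rw [hnil, pvAltLoop, dif_pos rfl, PySem.List.pyRange_one_eq_nil (by omega : (l.length : Int) + 1 ≤ (m : Int))]
      rfl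
  | succ c ih =>
      have hmn : (m : Int) ≤ (l.length : Int) := by omega
      have hK : (0:Int) < (l.length : Int) - m + 1 := by omega
      rw [pvAltLoop]
      have hne : ((PySem.List.pyRange 0 ((l.length : Int) - m + 1) 1).map (pvW l m)) ≠ [] := by
        simp [PySem.List.length_pyRange_one, ← List.length_pos_iff]
        omega
      rw [dif_neg hne]
      simp only
      -- lengths
      have hlen : ((((PySem.List.pyRange 0 ((l.length : Int) - m + 1) 1).map (pvW l m)).length : Int))
          = (l.length : Int) - m + 1 := by
        simp [PySem.List.length_pyRange_one]
        omega
      -- (a) the enumerate fold is one reference round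
      have hd' : (PySem.List.enumerate ((PySem.List.pyRange 0 ((l.length : Int) - m + 1) 1).map (pvW l m))).foldl
            (fun d js => d.insert (PySem.List.pyGetD l js.1 0, PySem.List.pyGetD l (js.1 + (m:Int) - 1) 0) js.2) d
          = pvF l d m := by
        rw [PySem.List.enumerate_eq_map_pyRange _ ([] : List (Int × Int))]
        rw [PySem.List.len_eq, hlen, List.foldl_map]
        unfold pvF
        apply PySem.List.foldl_congr_mem
        intro d' j hj
        rw [PySem.List.mem_pyRange_one] at hj
        rw [PySem.List.pyGetD_map_pyRange_of_nonneg _ _ _ _ hj.1 hj.2]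
      rw [hd']
      -- (b) the new segs are the windows of length m+1
      have hsegs : ((PySem.List.pyRange 0 (((((PySem.List.pyRange 0 ((l.length : Int) - m + 1) 1).map (pvW l m)).length : Int)) - 1) 1).map
            (fun j => PySem.List.pyGetD ((PySem.List.pyRange 0 ((l.length : Int) - m + 1) 1).map (pvW l m)) j []
              ++ [PySem.List.pyGetD ((PySem.List.pyRange 0 ((l.length : Int) - 1) 1).map (pvPf l)) (j + (m:Int) - 1) (0, 0)]))
          = (PySem.List.pyRange 0 ((l.length : Int) - ((m:Int) + 1) + 1) 1).map (pvW l ((m:Int) + 1)) := by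
        rw [hlen]
        have harg : (l.length : Int) - m + 1 - 1 = (l.length : Int) - ((m:Int) + 1) + 1 := by ring
        rw [harg]
        apply List.map_congr_left
        intro j hj
        rw [PySem.List.mem_pyRange_one] at hj
        rw [PySem.List.pyGetD_map_pyRange_of_nonneg _ _ _ _ hj.1 (by omega)]
        rw [PySem.List.pyGetD_map_pyRange_of_nonneg _ _ _ _ (by omega) (by omega)]
        unfold pvW
        have h1 : j + ((m:Int) + 1) - 1 = (j + (m:Int) - 1) + 1 := by ring
        rw [h1, PySem.List.pyRange_one_succ_right (by omega), List.map_append]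
        rfl
      rw [hsegs]
      -- (c) the induction hypothesis and peeling m off the range
      have hcast : ((m:Int) + 1) = ((m + 1 : Nat) : Int) := by push_cast; ring
      rw [hcast, ih (m + 1) _ (by omega) (by push_cast; omega)]
      conv_rhs => rw [PySem.List.pyRange_one_cons (show (m : Int) < (l.length : Int) + 1 by omega)]
      rw [List.foldl_cons]
      push_cast
      rfl

theorem generate_end_points_spec : Claim_equal_generate_end_points := by
  intro l _ _
  unfold Spec_generate_end_points
  rw [pv_A_eq_ref]
  unfold generate_end_points_alt
  simp only
  congr 2
  have hpf : (fun k => (PySem.List.pyGetD l k 0, PySem.List.pyGetD l (k + 1) 0)) = pvPf l := rfl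
  rw [hpf]
  have hsegs : ((PySem.List.pyRange 0 ((l.length : Int) - 1) 1).map (pvPf l)).map (fun p => [p])
      = (PySem.List.pyRange 0 ((l.length : Int) - ((2:Nat):Int) + 1) 1).map (pvW l ((2:Nat):Int)) := by
    rw [List.map_map]
    have harg : (l.length : Int) - 1 = (l.length : Int) - ((2:Nat):Int) + 1 := by push_cast; ring
    rw [harg]
    apply List.map_congr_left
    intro k _
    unfold pvW
    have h1 : k + ((2:Nat):Int) - 1 = k + 1 := by push_cast; ring
    rw [h1, PySem.List.pyRange_one_singleton]
    rfl
  rw [hsegs]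
  have h2 : (2 : Int) = ((2:Nat):Int) := by norm_num
  rw [h2]
  exact (pv_altLoop_eq_ref l ((l.length : Int) - 2 + 1).toNat 2 _ (le_refl 2) rfl).symm
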